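-- pv_equiv track=rewrite | github.com/justkbly/aniland | a.py | pick_best_embed
-- ===== SOURCE A (Python) =====
-- def is_tau_embed(url):
--     return 'tau-video.xyz/embed/' in url
--
-- def pick_best_embed(translator_dict):
--     """Tau-video'yu tercih eder, sonra diğer embed'ler."""
--     for links in translator_dict.values():
--         for link in links:
--             if is_tau_embed(link): return link
--     embed_hosts = ['filemoon', 'streamtape', 'sibnet', 'vidmoly', 'dood', 'voe.sx']
--     for links in translator_dict.values():
--         for link in links:
--             if any(h in link for h in embed_hosts): return link
--     for links in translator_dict.values():
--         if links: return links[0]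
--     return None
-- ===== SOURCE B (Python) =====
-- def pick_best_embed(translator_dict):
--     """Tau-video'yu tercih eder, sonra diğer embed'ler. (single pass)"""
--     embed_hosts = ['filemoon', 'streamtape', 'sibnet', 'vidmoly', 'dood', 'voe.sx']
--     best_tau = best_host = best_any = None
--     for links in translator_dict.values():
--         if links and best_any is None:
--             best_any = links[0]
--         for link in links:
--             if best_tau is None and 'tau-video.xyz/embed/' in link:
--                 best_tau = link
--             if best_host is None and any(h in link for h in embed_hosts):
--                 best_host = link
--     if best_tau is not None:
--         return best_tau
--     if best_host is not None:
--         return best_host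
--     return best_any
-- ===== Notes on version B (the rewrite author's own statement) =====
-- stated objective: alternative
-- what changed: Replaces A's three full scans of all links (tau pass, host pass, first-non-empty pass) with one single pass that maintains three first-match candidates (best_tau, best_host, best_any) and combines them at the end.
import Mathlib
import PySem

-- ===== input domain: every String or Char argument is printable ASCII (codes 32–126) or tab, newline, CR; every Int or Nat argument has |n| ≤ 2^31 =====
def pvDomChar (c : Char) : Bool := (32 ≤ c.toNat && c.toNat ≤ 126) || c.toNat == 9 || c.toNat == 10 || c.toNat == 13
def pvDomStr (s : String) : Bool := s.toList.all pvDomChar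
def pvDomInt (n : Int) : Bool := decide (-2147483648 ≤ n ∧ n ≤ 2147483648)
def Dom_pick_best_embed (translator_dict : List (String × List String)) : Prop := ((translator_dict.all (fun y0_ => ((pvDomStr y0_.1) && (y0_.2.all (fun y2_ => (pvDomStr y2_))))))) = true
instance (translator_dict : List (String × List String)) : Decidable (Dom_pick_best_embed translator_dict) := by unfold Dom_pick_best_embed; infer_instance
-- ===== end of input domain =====

-- B replaces A's three full scans with one pass keeping three first-match candidates (objective: alternative).


-- ===== PORT A =====
def is_tau_embed (url : String) : Bool := PySem.Str.isIn "tau-video.xyz/embed/" url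

def pvEmbedHosts : List String := ["filemoon", "streamtape", "sibnet", "vidmoly", "dood", "voe.sx"]

def pvIsHost (link : String) : Bool := pvEmbedHosts.any (fun h => PySem.Str.isIn h link)

-- inner loop: 'for link in links: if p(link): return link'
def pvScanLinks (p : String → Bool) : List String → Option String
  | [] => none
  | l :: ls => if p l then some l else pvScanLinks p ls

-- outer loop over values
def pvScanAll (p : String → Bool) : List (List String) → Option String
  | [] => none
  | links :: rest =>
    match pvScanLinks p links with
    | some l => some l
    | none => pvScanAll p rest

-- third loop: 'for links in values: if links: return links[0]'
def pvFirstNonEmpty : List (List String) → Option String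
  | [] => none
  | [] :: rest => pvFirstNonEmpty rest
  | (x :: _) :: _ => some x

def pick_best_embed (translator_dict : List (String × List String)) : Option String :=
  let vals := translator_dict.map Prod.snd
  match pvScanAll is_tau_embed vals with
  | some l => some l
  | none =>
    match pvScanAll pvIsHost vals with
    | some l => some l
    | none => pvFirstNonEmpty vals

-- ===== PORT B =====
def pvStepLink (s : Option String × Option String) (link : String) : Option String × Option String :=
  ( if s.1.isNone && is_tau_embed link then some link else s.1,
    if s.2.isNone && pvIsHost link then some link else s.2 )

def pvStepLinks (s : Option String × Option String × Option String) (links : List String) :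
    Option String × Option String × Option String :=
  let anyC : Option String :=
    match links with
    | [] => s.2.2
    | x :: _ => if s.2.2.isNone then some x else s.2.2
  let tb := links.foldl pvStepLink (s.1, s.2.1)
  (tb.1, tb.2, anyC)

def pick_best_embed_alt (translator_dict : List (String × List String)) : Option String :=
  let s := translator_dict.foldl (fun s p => pvStepLinks s p.2) (none, none, none)
  match s.1 with
  | some l => some l
  | none =>
    match s.2.1 with
    | some l => some l
    | none => s.2.2

-- ===== PRECONDITION & SPEC =====
def Spec_pick_best_embed (translator_dict : List (String × List String)) (out : Option String) : Prop := out = pick_best_embed_alt translator_dict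
instance (translator_dict : List (String × List String)) (out : Option String) : Decidable (Spec_pick_best_embed translator_dict out) := by unfold Spec_pick_best_embed; infer_instance

-- ===== CLAIM (what is proved, stated in full; the proofs are below) =====
def Claim_equal_pick_best_embed : Prop := ∀ (translator_dict : List (String × List String)), Dom_pick_best_embed translator_dict → Spec_pick_best_embed translator_dict (pick_best_embed translator_dict)

-- ===== LEMMAS AND PROOFS =====

lemma foldl_pvStepLink (links : List String) (a b : Option String) :
    links.foldl pvStepLink (a, b) =
      ((match a with | some x => some x | none => pvScanLinks is_tau_embed links),
       (match b with | some x => some x | none => pvScanLinks pvIsHost links)) := by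
  induction links generalizing a b with
  | nil => cases a <;> cases b <;> simp [pvScanLinks]
  | cons l ls ih =>
    simp only [List.foldl_cons, pvStepLink, pvScanLinks]
    cases a <;> cases b <;> simp [ih] <;> split_ifs <;> simp [ih]

lemma foldl_pvStepLinks (vs : List (List String)) (a b c : Option String) :
    vs.foldl pvStepLinks (a, b, c) =
      ((match a with | some x => some x | none => pvScanAll is_tau_embed vs),
       (match b with | some x => some x | none => pvScanAll pvIsHost vs),
       (match c with | some x => some x | none => pvFirstNonEmpty vs)) := by
  induction vs generalizing a b c with
  | nil => cases a <;> cases b <;> cases c <;> simp [pvScanAll, pvFirstNonEmpty]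
  | cons links rest ih =>
    simp only [List.foldl_cons, pvStepLinks, foldl_pvStepLink]
    rw [ih]
    cases a <;> cases b <;> cases c <;>
      simp [pvScanAll, pvFirstNonEmpty] <;>
      cases links <;>
      simp [pvScanLinks, pvFirstNonEmpty, pvScanAll] <;>
      split_ifs <;> simp

-- ===== VERDICT (by name: the statement is the Claim_ definition above) =====
theorem pick_best_embed_spec : Claim_equal_pick_best_embed := by
  intro td _
  unfold Spec_pick_best_embed pick_best_embed pick_best_embed_alt
  have h : td.foldl (fun s p => pvStepLinks s p.2) (none, none, none) =
      (td.map Prod.snd).foldl pvStepLinks (none, none, none) := by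
    rw [List.foldl_map]
  rw [h, foldl_pvStepLinks]
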